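-- pv_equiv track=rewrite | github.com/yusufcankucuk/data-communication-project | utils.py | hamming_control
-- ===== SOURCE A (Python) =====
-- def text_to_binary(text):
--     return ''.join(format(ord(c), '08b') for c in text)
--
-- def hamming_encode_block(block):
--     if len(block) < 4:
--         block = block.ljust(4, '0')
--     elif len(block) > 4:
--         block = block[:4]
--
--     data_bits = [int(bit) for bit in block]
--
--     p1 = data_bits[0] ^ data_bits[1] ^ data_bits[3]
--     p2 = data_bits[0] ^ data_bits[2] ^ data_bits[3]
--     p4 = data_bits[1] ^ data_bits[2] ^ data_bits[3]
--
--     encoded = [p1, p2, data_bits[0], p4, data_bits[1], data_bits[2], data_bits[3]]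
--     return ''.join(str(bit) for bit in encoded)
--
-- def hamming_control(text):
--     binary = text_to_binary(text)
--     check_bits = []
--     for i in range(0, len(binary), 4):
--         block = binary[i:i+4]
--         if len(block) < 4:
--             block = block.ljust(4, '0')
--         encoded = hamming_encode_block(block)
--         check_bits.append(encoded[:3])
--     return ''.join(check_bits)
-- ===== SOURCE B (Python) =====
-- _TABLE = []
-- for _n in range(16):
--     _d0, _d1, _d2, _d3 = (_n >> 3) & 1, (_n >> 2) & 1, (_n >> 1) & 1, _n & 1
--     _TABLE.append(str(_d0 ^ _d1 ^ _d3) + str(_d0 ^ _d2 ^ _d3) + str(_d0))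
--
-- def hamming_control(text):
--     parts = []
--     for c in text:
--         o = ord(c)
--         parts.append(_TABLE[(o >> 4) & 15])
--         parts.append(_TABLE[o & 15])
--     return ''.join(parts)
-- ===== Notes on version B (the rewrite author's own statement) =====
-- stated objective: faster
-- what changed: B precomputes a 16-entry nibble-to-check-bits lookup table once and walks the text character by character (two table lookups per char), instead of building the whole binary string and re-deriving XOR parities and a 7-bit encoding for every 4-bit slice.
import Mathlib
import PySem

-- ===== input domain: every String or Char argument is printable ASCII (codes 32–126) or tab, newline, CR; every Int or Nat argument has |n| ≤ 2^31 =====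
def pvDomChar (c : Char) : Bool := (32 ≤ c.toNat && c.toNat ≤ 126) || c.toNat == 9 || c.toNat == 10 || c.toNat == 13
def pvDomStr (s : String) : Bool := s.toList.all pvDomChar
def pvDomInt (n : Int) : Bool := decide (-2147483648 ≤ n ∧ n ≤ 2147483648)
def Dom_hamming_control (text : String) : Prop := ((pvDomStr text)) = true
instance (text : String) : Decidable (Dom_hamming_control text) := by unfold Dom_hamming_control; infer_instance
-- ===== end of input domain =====

-- B precomputes a 16-entry nibble lookup table and walks the text per character (two lookups each),
-- instead of A's flat step-by-4 loop over the whole binary string that re-derives parities per block.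


-- ===== PORT A =====
-- format(ord(c), '08b') = binary digits of ord(c) left-zero-padded to width 8 (exact for ord(c) ≥ 0)
def text_to_binary (text : String) : List Char :=
  (text.toList.map (fun c => PySem.Chars.zfill (PySem.Int.toBinChars (c.toNat : Int)) 8)).flatten

def hamming_encode_block (block : List Char) : List Char :=
  let block := if block.length < 4 then block ++ List.replicate (4 - block.length) '0'  -- block.ljust(4, '0'), by hand: pad right with '0'
               else if block.length > 4 then PySem.List.slice block none (some 4)       -- block[:4]
               else block
  -- int(bit): total form of PySem.Int.ofChars?; every call site passes only '0'/'1' chars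
  let data_bits := block.map (fun bit => (PySem.Int.ofChars? [bit]).getD 0)
  let d0 := PySem.List.pyGetD data_bits 0 0
  let d1 := PySem.List.pyGetD data_bits 1 0
  let d2 := PySem.List.pyGetD data_bits 2 0
  let d3 := PySem.List.pyGetD data_bits 3 0
  let p1 := PySem.Int.bxor (PySem.Int.bxor d0 d1) d3
  let p2 := PySem.Int.bxor (PySem.Int.bxor d0 d2) d3
  let p4 := PySem.Int.bxor (PySem.Int.bxor d1 d2) d3
  let encoded := [p1, p2, d0, p4, d1, d2, d3]
  (encoded.map PySem.Int.toChars).flatten                 -- ''.join(str(bit) for bit in encoded)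

def hamming_control (text : String) : String :=
  let binary := text_to_binary text
  let check_bits := (PySem.List.pyRange 0 (binary.length : Int) 4).foldl
    (fun acc i =>
      let block := PySem.List.slice binary (some i) (some (i + 4))
      let block := if block.length < 4 then block ++ List.replicate (4 - block.length) '0' else block
      let encoded := hamming_encode_block block
      acc ++ [PySem.List.slice encoded none (some 3)]) []   -- check_bits.append(encoded[:3])
  String.ofList check_bits.flatten                          -- ''.join(check_bits)

-- ===== PORT B =====
-- module-level table build: for _n in range(16): _TABLE.append(...)
def pvTable : List (List Char) :=
  (PySem.List.pyRange 0 16 1).foldl (fun (acc : List (List Char)) (n : Int) =>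
    let d0 := PySem.Int.band (n >>> (3 : Nat)) 1
    let d1 := PySem.Int.band (n >>> (2 : Nat)) 1
    let d2 := PySem.Int.band (n >>> (1 : Nat)) 1
    let d3 := PySem.Int.band n 1
    acc ++ [PySem.Int.toChars (PySem.Int.bxor (PySem.Int.bxor d0 d1) d3) ++
            PySem.Int.toChars (PySem.Int.bxor (PySem.Int.bxor d0 d2) d3) ++
            PySem.Int.toChars d0]) []

def hamming_control_alt (text : String) : String :=
  -- _TABLE[i]: index is always masked to 0..15, so the total pyGetD with default [] is exact
  let parts := text.toList.foldl (fun acc c =>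
    let o : Int := (c.toNat : Int)
    acc ++ [PySem.List.pyGetD pvTable (PySem.Int.band (o >>> (4 : Nat)) 15) []]
        ++ [PySem.List.pyGetD pvTable (PySem.Int.band o 15) []]) []
  String.ofList parts.flatten                               -- ''.join(parts)

-- ===== PRECONDITION & SPEC =====
def Spec_hamming_control (text : String) (out : String) : Prop := out = hamming_control_alt text
instance (text : String) (out : String) : Decidable (Spec_hamming_control text out) := by unfold Spec_hamming_control; infer_instance

-- ===== CLAIM (what is proved, stated in full; the proofs are below) =====
def Claim_equal_hamming_control : Prop := ∀ (text : String), Dom_hamming_control text → Spec_hamming_control text (hamming_control text)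

-- ===== LEMMAS AND PROOFS =====

-- the 8-bit encoding of one character code
def pvBin8 (n : Nat) : List Char := PySem.Chars.zfill (PySem.Int.toBinChars (n : Int)) 8

-- the per-block body of A's loop
def pvF (block : List Char) : List Char :=
  PySem.List.slice
    (hamming_encode_block (if block.length < 4 then block ++ List.replicate (4 - block.length) '0' else block))
    none (some 3)

-- the list of consecutive 4-chunks (m of them)
def pvChunks : Nat → List Char → List (List Char)
  | 0, _ => []
  | m + 1, l => l.take 4 :: pvChunks m (l.drop 4)

set_option maxRecDepth 4096 in
lemma pv_len_bin8 : ∀ n : Nat, n < 128 → (pvBin8 n).length = 8 := by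
  decide

set_option maxRecDepth 8192 in
lemma pv_key : ∀ n : Nat, n < 128 →
    pvF ((pvBin8 n).take 4) ++ pvF ((pvBin8 n).drop 4)
      = PySem.List.pyGetD pvTable (PySem.Int.band ((n : Int) >>> (4 : Nat)) 15) []
        ++ PySem.List.pyGetD pvTable (PySem.Int.band (n : Int) 15) [] := by
  decide

lemma pv_pyRange4_shift (n : Nat) :
    PySem.List.pyRange 0 ((4 + n : Nat) : Int) 4
      = 0 :: (PySem.List.pyRange 0 (n : Int) 4).map (· + 4) := by
  rw [PySem.List.pyRange_of_pos _ _ (by norm_num), PySem.List.pyRange_of_pos _ _ (by norm_num)]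
  have h1 : (if (0:Int) < ((4 + n : Nat) : Int) then ((((4 + n : Nat) : Int) - 0 + 4 - 1)/4).toNat else 0)
      = ((n + 3)/4) + 1 := by
    rw [if_pos (by push_cast; omega)]; omega
  have h2 : (if (0:Int) < ((n : Nat) : Int) then (((n : Nat) : Int) - 0 + 4 - 1)/4 |>.toNat else 0)
      = (n + 3)/4 := by
    split_ifs with h <;> omega
  rw [h1, h2, List.range_succ_eq_map]
  simp only [List.map_cons, List.map_map]
  refine congrArg₂ _ (by norm_num) ?_
  apply List.map_congr_left
  intro k _
  simp only [Function.comp_apply]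
  push_cast
  ring

lemma pv_fold_chunks (G : List (List Char) → List Char → List (List Char)) :
    ∀ (m : Nat) (l : List Char) (acc : List (List Char)), l.length = 4 * m →
    (PySem.List.pyRange 0 (l.length : Int) 4).foldl
        (fun a i => G a (PySem.List.slice l (some i) (some (i + 4)))) acc
      = (pvChunks m l).foldl G acc := by
  intro m
  induction m with
  | zero =>
    intro l acc h
    rw [h]
    simp [PySem.List.pyRange_of_pos _ _ (by norm_num : (0:Int) < 4), pvChunks]
  | succ m ih =>
    intro l acc h
    have hl : (l.length : Int) = ((4 + 4 * m : Nat) : Int) := by rw [h]; push_cast; ring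
    rw [hl, pv_pyRange4_shift]
    simp only [List.foldl_cons, List.foldl_map]
    have h0 : PySem.List.slice l (some 0) (some (0 + 4)) = l.take 4 := by
      rw [PySem.List.slice_toNat _ (by omega) (by omega)]
      norm_num
      rfl
    rw [h0]
    rw [PySem.List.foldl_congr_mem _ _
        (fun a i => G a (PySem.List.slice (l.drop 4) (some i) (some (i + 4)))) _ ?_]
    · have hlen : ((l.drop 4).length : Int) = ((4 * m : Nat) : Int) := by
        simp [h]; omega
      have := ih (l.drop 4) (G acc (l.take 4)) (by simp only [List.length_drop, h]; omega)
      rw [hlen] at this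
      rw [this]
      rfl
    · intro a i hi
      beta_reduce
      have hi0 : 0 ≤ i := ((PySem.List.mem_pyRange_iff_of_pos (by norm_num) i).1 hi).1
      rw [PySem.List.slice_toNat _ (by omega) (by omega),
          PySem.List.slice_toNat _ (by omega) (by omega)]
      rw [List.drop_drop]
      have e1 : (i + 4 + 4).toNat - (i + 4).toNat = 4 := by omega
      have e2 : (i + 4).toNat - i.toNat = 4 := by omega
      have e3 : (i + 4).toNat = i.toNat + 4 := by omega
      have e4 : 4 + i.toNat = i.toNat + 4 := by omega
      rw [e1, e2, e3, e4]

lemma pv_chunks_flatMap : ∀ (cs : List Char), (∀ c ∈ cs, (pvBin8 c.toNat).length = 8) →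
    pvChunks (2 * cs.length) (cs.flatMap (fun c => pvBin8 c.toNat))
      = cs.flatMap (fun c => [(pvBin8 c.toNat).take 4, (pvBin8 c.toNat).drop 4]) := by
  intro cs
  induction cs with
  | nil => intro _; simp [pvChunks]
  | cons c t ih =>
    intro h
    have hb : (pvBin8 c.toNat).length = 8 := h c (List.mem_cons_self ..)
    have h2 : 2 * (c :: t).length = (2 * t.length) + 1 + 1 := by simp [List.length_cons]; ring
    rw [h2]
    simp only [List.flatMap_cons, pvChunks]
    refine congrArg₂ _ ?_ (congrArg₂ _ ?_ ?_)
    · rw [List.take_append_of_le_length (by omega)]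
    · rw [List.drop_append_of_le_length (by omega),
          List.take_append_of_le_length (by simp [hb]),
          List.take_of_length_le (by simp [hb])]
    · rw [List.drop_append_of_le_length (by omega),
          List.drop_append_of_le_length (by simp [hb])]
      have : List.drop 4 (List.drop 4 (pvBin8 c.toNat)) = [] := by
        apply List.drop_eq_nil_of_le; simp [hb]
      rw [this]
      simpa using ih (fun x hx => h x (List.mem_cons_of_mem _ hx))

lemma pv_len_flatMap (cs : List Char) (h : ∀ c ∈ cs, (pvBin8 c.toNat).length = 8) :
    (cs.flatMap (fun c => pvBin8 c.toNat)).length = 4 * (2 * cs.length) := by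
  induction cs with
  | nil => simp
  | cons c t ih =>
    simp only [List.flatMap_cons, List.length_append, List.length_cons,
      h c (List.mem_cons_self ..), ih (fun x hx => h x (List.mem_cons_of_mem _ hx))]
    ring

lemma pv_flat : ∀ (cs : List Char), (∀ c ∈ cs, c.toNat < 128) →
    ((cs.flatMap (fun c => [(pvBin8 c.toNat).take 4, (pvBin8 c.toNat).drop 4])).map pvF).flatten
      = (cs.flatMap (fun c =>
          [PySem.List.pyGetD pvTable (PySem.Int.band (((c.toNat : Int)) >>> (4 : Nat)) 15) [],
           PySem.List.pyGetD pvTable (PySem.Int.band ((c.toNat : Int)) 15) []])).flatten := by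
  intro cs
  induction cs with
  | nil => intro _; simp
  | cons c t ih =>
    intro h
    simp only [List.flatMap_cons, List.map_append, List.map_cons, List.map_nil,
      List.flatten_append, List.flatten_cons, List.flatten_nil]
    rw [ih (fun x hx => h x (List.mem_cons_of_mem _ hx))]
    have hk := pv_key c.toNat (h c (List.mem_cons_self ..))
    rw [← List.append_assoc, ← List.append_assoc, hk]

-- ===== VERDICT (by name: the statement is the Claim_ definition above) =====
theorem hamming_control_spec : Claim_equal_hamming_control := by
  intro text hdom
  unfold Spec_hamming_control
  have hchars : ∀ c ∈ text.toList, c.toNat < 128 := by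
    intro c hc
    unfold Dom_hamming_control pvDomStr at hdom
    have := List.all_eq_true.mp hdom c hc
    unfold pvDomChar at this
    simp only [Bool.or_eq_true, Bool.and_eq_true, decide_eq_true_eq, beq_iff_eq] at this
    omega
  have h8 : ∀ c ∈ text.toList, (pvBin8 c.toNat).length = 8 :=
    fun c hc => pv_len_bin8 _ (hchars c hc)
  show hamming_control text = hamming_control_alt text
  have hA : hamming_control text =
      String.ofList
        (((PySem.List.pyRange 0 (((text.toList.flatMap (fun c => pvBin8 c.toNat)).length : Nat) : Int) 4).foldl
          (fun a i => (fun a b => a ++ [pvF b]) a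
            (PySem.List.slice (text.toList.flatMap (fun c => pvBin8 c.toNat)) (some i) (some (i + 4)))) []).flatten) := rfl
  rw [hA, pv_fold_chunks (fun a b => a ++ [pvF b]) (2 * text.toList.length) _ []
        (pv_len_flatMap _ h8),
      pv_chunks_flatMap _ h8, PySem.List.foldl_append_singleton_eq_map, List.nil_append]
  have hB : hamming_control_alt text =
      String.ofList
        ((text.toList.foldl (fun acc c =>
            acc ++ [PySem.List.pyGetD pvTable (PySem.Int.band (((c.toNat : Int)) >>> (4 : Nat)) 15) []]
                ++ [PySem.List.pyGetD pvTable (PySem.Int.band ((c.toNat : Int)) 15) []]) []).flatten) := rfl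
  rw [hB]
  simp only [List.append_assoc, List.singleton_append]
  rw [show (fun (acc : List (List Char)) (c : Char) =>
        acc ++ [PySem.List.pyGetD pvTable (PySem.Int.band (((c.toNat : Int)) >>> (4 : Nat)) 15) [],
                PySem.List.pyGetD pvTable (PySem.Int.band ((c.toNat : Int)) 15) []])
      = (fun acc c => acc ++ (fun c =>
          [PySem.List.pyGetD pvTable (PySem.Int.band (((c.toNat : Int)) >>> (4 : Nat)) 15) [],
           PySem.List.pyGetD pvTable (PySem.Int.band ((c.toNat : Int)) 15) []]) c) from rfl,
      PySem.List.foldl_append_eq_flatMap, List.nil_append]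
  exact congrArg _ (pv_flat _ hchars)
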